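-- pv_equiv track=rewrite | github.com/HyunSong-Koh/test1 | hw2-6.py | pal_cnt
-- ===== SOURCE A (Python) =====
-- def pal_cnt(list):
--     cnt = 0
--     for str in list:    #리스트의 문자열 하나씩
--         pal_check = 0
--         for i in range(len(str)//2):
--             if str[i] == str[-(i+1)]:
--                 continue
--             else:
--                 pal_check += 1
--         if pal_check == 0:
--             cnt += 1
--         else:
--             continue
--     return cnt
-- ===== SOURCE B (Python) =====
-- def pal_cnt(list):
--     return sum(1 for s in list if s == s[::-1])
-- ===== Notes on version B (the rewrite author's own statement) =====
-- stated objective: idiomatic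
-- what changed: Replaced the per-string half-length two-pointer mismatch counter with a whole-string reversal comparison (s == s[::-1]) inside a generator sum.
import Mathlib
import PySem

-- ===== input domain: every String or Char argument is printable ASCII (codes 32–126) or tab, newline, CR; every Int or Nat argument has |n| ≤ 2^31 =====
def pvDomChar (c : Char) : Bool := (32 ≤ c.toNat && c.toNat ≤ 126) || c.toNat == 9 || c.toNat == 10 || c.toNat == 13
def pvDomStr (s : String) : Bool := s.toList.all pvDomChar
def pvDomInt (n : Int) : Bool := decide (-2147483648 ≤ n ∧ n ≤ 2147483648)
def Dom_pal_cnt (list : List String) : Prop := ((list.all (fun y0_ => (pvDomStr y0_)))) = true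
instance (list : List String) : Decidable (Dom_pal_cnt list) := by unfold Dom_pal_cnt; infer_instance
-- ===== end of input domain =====

-- B replaces the per-string half-length two-pointer mismatch loop by a reversal comparison (s == s[::-1]) in a generator sum; idiomatic, same cost.


-- ===== PORT A =====
def pal_cnt (list : List String) : Int :=
  list.foldl (fun cnt s =>
    let pal_check : Int :=
      (PySem.List.pyRange 0 (PySem.Int.floordiv (PySem.Str.len s) 2) 1).foldl
        (fun pc i =>
          if PySem.Str.pyGet? s i = PySem.Str.pyGet? s (-(i + 1)) then pc else pc + 1) 0
    if pal_check = 0 then cnt + 1 else cnt) 0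

-- ===== PORT B =====
def pal_cnt_alt (list : List String) : Int :=
  (list.map (fun s =>
    if PySem.Str.slice? s none none (-1) = some s then (1 : Int) else 0)).sum

-- ===== PRECONDITION & SPEC =====
def Spec_pal_cnt (list : List String) (out : Int) : Prop := out = pal_cnt_alt list
instance (list : List String) (out : Int) : Decidable (Spec_pal_cnt list out) := by unfold Spec_pal_cnt; infer_instance

-- ===== CLAIM (what is proved, stated in full; the proofs are below) =====
def Claim_equal_pal_cnt : Prop := ∀ (list : List String), Dom_pal_cnt list → Spec_pal_cnt list (pal_cnt list)

-- ===== LEMMAS AND PROOFS =====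

-- the half-range pairwise-index condition characterises "reverse equals self"
theorem pal_half_iff (cs : List Char) :
    (∀ i : Nat, i < cs.length / 2 → cs[i]? = cs[cs.length - (i+1)]?) ↔ cs.reverse = cs := by
  constructor
  · intro h
    apply List.ext_getElem?
    intro i
    by_cases hi : i < cs.length
    · rw [List.getElem?_reverse hi]
      by_cases h1 : i < cs.length / 2
      · have e : cs.length - 1 - i = cs.length - (i+1) := by omega
        rw [e]; exact (h i h1).symm
      · by_cases h2 : cs.length - 1 - i < cs.length / 2
        · have := h (cs.length - 1 - i) h2
          have e : cs.length - (cs.length - 1 - i + 1) = i := by omega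
          rw [e] at this; exact this
        · have e : cs.length - 1 - i = i := by omega
          rw [e]
    · rw [List.getElem?_eq_none (by simpa using Nat.le_of_not_lt hi),
          List.getElem?_eq_none (Nat.le_of_not_lt hi)]
  · intro h i hi
    have hi' : i < cs.length := by omega
    have := List.getElem?_reverse (l := cs) hi'
    rw [h] at this
    have e : cs.length - (i+1) = cs.length - 1 - i := by omega
    rw [e]; exact this

-- the negative index -(k+1) of A reaches position length-(k+1)
theorem pal_pyGet_neg (s : String) (k : Nat) (hk : k < s.toList.length / 2) :
    PySem.Str.pyGet? s (-((k:Int) + 1)) = s.toList[s.toList.length - (k+1)]? := by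
  have e : -((k:Int) + 1) = -(((k+1 : Nat)) : Int) := by push_cast; ring
  rw [e]
  simp only [PySem.Str.pyGet?, PySem.Chars.pyGet?]
  rw [PySem.List.pyGet?_neg_natCast _ (k+1) (by omega) (by omega)]

-- A's inner mismatch fold returns 0 exactly on the half-range condition
theorem pal_inner_iff (s : String) :
    ((PySem.List.pyRange 0 (PySem.Int.floordiv (PySem.Str.len s) 2) 1).foldl
        (fun pc i =>
          if PySem.Str.pyGet? s i = PySem.Str.pyGet? s (-(i + 1)) then pc else pc + 1) (0 : Int)) = 0
      ↔ ∀ k : Nat, k < s.toList.length / 2 → s.toList[k]? = s.toList[s.toList.length - (k+1)]? := by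
  have hb : (fun (pc : Int) (i : Int) =>
          if PySem.Str.pyGet? s i = PySem.Str.pyGet? s (-(i + 1)) then pc else pc + 1)
      = (fun pc i => if ¬ (PySem.Str.pyGet? s i = PySem.Str.pyGet? s (-(i + 1))) then pc + 1 else pc) := by
    funext pc i
    by_cases h : PySem.Str.pyGet? s i = PySem.Str.pyGet? s (-(i + 1))
    · rw [if_pos h, if_neg (not_not_intro h)]
    · rw [if_neg h, if_pos h]
  rw [hb, PySem.List.foldl_ite_add_one]
  rw [PySem.Str.len_eq]
  rw [show ((2:Int) = ((2:Nat) : Int)) from rfl, PySem.Int.floordiv_natCast,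
      PySem.List.pyRange_zero_natCast]
  simp only [List.countP_map, zero_add, Nat.cast_eq_zero, List.countP_eq_zero, List.mem_range,
    Function.comp, decide_not, Bool.not_eq_true', decide_eq_false_iff_not, Decidable.not_not]
  constructor
  · intro h k hk
    have := h k hk
    rw [PySem.Str.pyGet?_natCast, pal_pyGet_neg s k hk] at this
    exact this
  · intro h k hk
    rw [PySem.Str.pyGet?_natCast, pal_pyGet_neg s k hk]
    exact h k hk

-- B's comparison with the reversed slice is the same test
theorem pal_alt_test (s : String) :
    (PySem.Str.slice? s none none (-1) = some s) ↔ s.toList.reverse = s.toList := by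
  rw [PySem.Str.slice?_none_none_neg_one]
  simp only [Option.some.injEq]
  constructor
  · intro h
    have := congrArg String.toList h
    simpa using this
  · intro h
    have : String.ofList s.toList.reverse = String.ofList s.toList := by rw [h]
    simpa using this

theorem pal_cnt_spec : Claim_equal_pal_cnt := by
  intro list _
  unfold Spec_pal_cnt pal_cnt pal_cnt_alt
  rw [PySem.List.foldl_ite_add_one
    (p := fun s => ((PySem.List.pyRange 0 (PySem.Int.floordiv (PySem.Str.len s) 2) 1).foldl
        (fun pc i =>
          if PySem.Str.pyGet? s i = PySem.Str.pyGet? s (-(i + 1)) then pc else pc + 1) (0 : Int)) = 0)]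
  have hB : (fun s => if PySem.Str.slice? s none none (-1) = some s then (1 : Int) else 0)
      = (fun s => if (decide (PySem.Str.slice? s none none (-1) = some s)) = true then (1 : Int) else 0) := by
    funext s; simp
  rw [hB, PySem.List.sum_map_ite_one_zero]
  rw [zero_add]
  congr 1
  apply List.countP_congr
  intro s _
  simp only [decide_eq_true_eq]
  rw [pal_inner_iff, pal_alt_test, pal_half_iff]
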